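-- pv_equiv track=rewrite | github.com/mauryavivekMPS/prod_code_clone | ivetl/pipelines/publishedarticles/tasks/GetHighwireMetadataTask.py | generate_match_pattern
-- ===== SOURCE A (Python) =====
-- def generate_match_pattern(example_doi):
--     pattern = ''
--     num_non_alphas = 0
--
--     def _non_alpha_re(n):
--         return '[^a-z]' + ('{%s}' % n if n > 1 else '')
--
--     for c in example_doi:
--         if c.isalpha():
--             if num_non_alphas:
--                 pattern += _non_alpha_re(num_non_alphas)
--                 num_non_alphas = 0
--             pattern += c
--         else:
--             num_non_alphas += 1
--
--     if num_non_alphas: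
--         pattern += _non_alpha_re(num_non_alphas)
--
--     return pattern
-- ===== SOURCE B (Python) =====
-- def generate_match_pattern(example_doi):
--     parts = []
--     i, n = 0, len(example_doi)
--     while i < n:
--         alpha = example_doi[i].isalpha()
--         j = i + 1
--         while j < n and example_doi[j].isalpha() == alpha:
--             j += 1
--         if alpha:
--             parts.append(example_doi[i:j])
--         else:
--             k = j - i
--             parts.append('[^a-z]' + ('{%s}' % k if k > 1 else ''))
--         i = j
--     return ''.join(parts)
-- ===== Notes on version B (the rewrite author's own statement) =====
-- stated objective: idiomatic
-- what changed: Replaced A's per-character state machine (pending non-alpha counter with a post-loop flush) by a run-grouping scan that splits the string into maximal alpha/non-alpha runs and emits one pattern piece per run.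
import Mathlib
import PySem

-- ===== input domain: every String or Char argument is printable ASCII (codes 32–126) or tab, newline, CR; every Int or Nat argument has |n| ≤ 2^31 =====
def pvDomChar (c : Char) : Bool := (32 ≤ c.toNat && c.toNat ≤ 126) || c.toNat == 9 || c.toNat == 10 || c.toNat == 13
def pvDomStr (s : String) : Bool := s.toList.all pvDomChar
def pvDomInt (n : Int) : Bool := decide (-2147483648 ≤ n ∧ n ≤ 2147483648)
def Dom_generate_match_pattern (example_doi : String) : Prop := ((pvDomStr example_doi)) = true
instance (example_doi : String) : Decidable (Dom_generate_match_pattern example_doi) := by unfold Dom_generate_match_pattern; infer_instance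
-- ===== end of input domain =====

-- B replaces A's per-character state machine (pending non-alpha counter + post-loop flush)
-- by a run-grouping scan emitting one pattern piece per maximal alpha/non-alpha run (objective: idiomatic).

-- ===== PORT A =====
-- _non_alpha_re(n) = '[^a-z]' + ('{%s}' % n if n > 1 else '')
def gmpNonAlphaRe (n : Nat) : List Char :=
  "[^a-z]".toList ++ (if n > 1 then '{' :: (PySem.Int.toChars (n : Int) ++ ['}']) else [])

-- the for-loop with state (pattern, num_non_alphas), plus the final flush
def gmpLoopA : List Char → List Char → Nat → List Char
  | [], pattern, k => pattern ++ (if k ≠ 0 then gmpNonAlphaRe k else [])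
  | c :: cs, pattern, k =>
    if PySem.Chars.isalpha c then
      gmpLoopA cs ((if k ≠ 0 then pattern ++ gmpNonAlphaRe k else pattern) ++ [c]) 0
    else
      gmpLoopA cs pattern (k + 1)

def generate_match_pattern (example_doi : String) : String :=
  String.mk (gmpLoopA example_doi.toList [] 0)

-- ===== PORT B =====
-- one pattern piece per maximal run of characters with the same isalpha() value
def gmpRuns : List Char → List Char
  | [] => []
  | c :: cs =>
    (if PySem.Chars.isalpha c then
       c :: cs.takeWhile (fun d => PySem.Chars.isalpha d == PySem.Chars.isalpha c)
     else
       "[^a-z]".toList ++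
         (if (cs.takeWhile (fun d => PySem.Chars.isalpha d == PySem.Chars.isalpha c)).length + 1 > 1 then
            '{' :: (PySem.Int.toChars (((cs.takeWhile (fun d => PySem.Chars.isalpha d == PySem.Chars.isalpha c)).length + 1 : Nat) : Int) ++ ['}'])
          else []))
      ++ gmpRuns (cs.dropWhile (fun d => PySem.Chars.isalpha d == PySem.Chars.isalpha c))
  termination_by cs => cs.length
  decreasing_by
    simpa using Nat.lt_succ_of_le (List.length_dropWhile_le _ _)

def generate_match_pattern_alt (example_doi : String) : String :=
  String.mk (gmpRuns example_doi.toList)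

-- ===== PRECONDITION & SPEC =====
def Spec_generate_match_pattern (example_doi : String) (out : String) : Prop := out = generate_match_pattern_alt example_doi
instance (example_doi : String) (out : String) : Decidable (Spec_generate_match_pattern example_doi out) := by unfold Spec_generate_match_pattern; infer_instance

-- ===== CLAIM (what is proved, stated in full; the proofs are below) =====
def Claim_equal_generate_match_pattern : Prop := ∀ (example_doi : String), Dom_generate_match_pattern example_doi → Spec_generate_match_pattern example_doi (generate_match_pattern example_doi)

-- ===== LEMMAS AND PROOFS =====

-- the accumulated pattern only ever receives appends, so it factors out
theorem gmpLoopA_factor (cs : List Char) : ∀ (p : List Char) (k : Nat),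
    gmpLoopA cs p k = p ++ gmpLoopA cs [] k := by
  induction cs with
  | nil => intro p k; simp [gmpLoopA]
  | cons c cs ih =>
    intro p k
    by_cases h : PySem.Chars.isalpha c = true
    · by_cases hk : k = 0
      · rw [show gmpLoopA (c :: cs) p k = gmpLoopA cs (p ++ [c]) 0 by
              simp [gmpLoopA, h, hk],
            show gmpLoopA (c :: cs) ([] : List Char) k = gmpLoopA cs [c] 0 by
              simp [gmpLoopA, h, hk],
            ih (p ++ [c]), ih [c]]
        simp
      · rw [show gmpLoopA (c :: cs) p k = gmpLoopA cs (p ++ gmpNonAlphaRe k ++ [c]) 0 by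
              simp [gmpLoopA, h, hk],
            show gmpLoopA (c :: cs) ([] : List Char) k = gmpLoopA cs (gmpNonAlphaRe k ++ [c]) 0 by
              simp [gmpLoopA, h, hk],
            ih (p ++ gmpNonAlphaRe k ++ [c]), ih (gmpNonAlphaRe k ++ [c])]
        simp
    · rw [show gmpLoopA (c :: cs) p k = gmpLoopA cs p (k + 1) by simp [gmpLoopA, h],
          show gmpLoopA (c :: cs) ([] : List Char) k = gmpLoopA cs [] (k + 1) by
            simp [gmpLoopA, h],
          ih p (k + 1)]

-- A's loop over a run of alphabetic characters (with no pending non-alphas) copies it verbatim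
theorem gmpLoopA_alpha_run (r : List Char) (rest : List Char)
    (h : ∀ c ∈ r, PySem.Chars.isalpha c = true) :
    gmpLoopA (r ++ rest) [] 0 = r ++ gmpLoopA rest [] 0 := by
  induction r with
  | nil => simp
  | cons c r ih =>
    have hc := h c (by simp)
    rw [List.cons_append,
        show gmpLoopA (c :: (r ++ rest)) [] 0 = gmpLoopA (r ++ rest) [c] 0 by
          simp [gmpLoopA, hc],
        gmpLoopA_factor, ih (fun d hd => h d (by simp [hd]))]
    simp

-- A's loop over a run of non-alphabetic characters just counts it
theorem gmpLoopA_nonalpha_run (r : List Char) (rest : List Char)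
    (h : ∀ c ∈ r, PySem.Chars.isalpha c = false) : ∀ (k : Nat),
    gmpLoopA (r ++ rest) [] k = gmpLoopA rest [] (k + r.length) := by
  induction r with
  | nil => simp
  | cons c r ih =>
    intro k
    have hc := h c (by simp)
    rw [List.cons_append,
        show gmpLoopA (c :: (r ++ rest)) [] k = gmpLoopA (r ++ rest) [] (k + 1) by
          simp [gmpLoopA, hc],
        ih (fun d hd => h d (by simp [hd])) (k + 1)]
    congr 1
    simp
    omega

-- a pending non-alpha count k ≠ 0 is flushed up front when the rest starts alphabetic (or is empty)
theorem gmpLoopA_flush (rest : List Char) (k : Nat) (hk : k ≠ 0)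
    (hhead : ∀ d ∈ rest.head?, PySem.Chars.isalpha d = true) :
    gmpLoopA rest [] k = gmpNonAlphaRe k ++ gmpLoopA rest [] 0 := by
  cases rest with
  | nil => simp [gmpLoopA, hk]
  | cons d rs =>
    have hd : PySem.Chars.isalpha d = true := hhead d (by simp)
    rw [show gmpLoopA (d :: rs) [] k = gmpLoopA rs (gmpNonAlphaRe k ++ [d]) 0 by
          simp [gmpLoopA, hd, hk],
        show gmpLoopA (d :: rs) [] 0 = gmpLoopA rs [d] 0 by simp [gmpLoopA, hd],
        gmpLoopA_factor rs (gmpNonAlphaRe k ++ [d]), gmpLoopA_factor rs [d]]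
    simp

-- the head of dropWhile fails the predicate
theorem head?_dropWhile_false {α : Type} (p : α → Bool) (l : List α) :
    ∀ d ∈ (l.dropWhile p).head?, p d = false := by
  induction l with
  | nil => simp
  | cons c cs ih =>
    by_cases h : p c = true
    · simpa [List.dropWhile_cons, h] using ih
    · simp only [Bool.not_eq_true] at h
      intro d hd
      simp [h] at hd
      rw [← hd, h]

-- main equivalence of the two traversals
theorem gmpLoopA_eq_gmpRuns (cs : List Char) : gmpLoopA cs [] 0 = gmpRuns cs := by
  induction cs using gmpRuns.induct with
  | case1 => simp [gmpLoopA, gmpRuns]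
  | case2 c cs ih =>
    have hsplit : c :: cs
        = (c :: cs.takeWhile (fun d => PySem.Chars.isalpha d == PySem.Chars.isalpha c))
          ++ cs.dropWhile (fun d => PySem.Chars.isalpha d == PySem.Chars.isalpha c) := by
      simp [List.takeWhile_append_dropWhile]
    have hrunmem : ∀ d ∈ cs.takeWhile (fun d => PySem.Chars.isalpha d == PySem.Chars.isalpha c),
        PySem.Chars.isalpha d = PySem.Chars.isalpha c := by
      intro d hd
      simpa using List.mem_takeWhile_imp hd
    have hhead : ∀ d ∈ (cs.dropWhile (fun d => PySem.Chars.isalpha d == PySem.Chars.isalpha c)).head?,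
        PySem.Chars.isalpha d ≠ PySem.Chars.isalpha c := by
      intro d hd
      simpa using head?_dropWhile_false _ cs d hd
    rw [gmpRuns]
    by_cases ha : PySem.Chars.isalpha c = true
    · -- alphabetic run: copied verbatim
      rw [hsplit, gmpLoopA_alpha_run _ _ (by
            intro d hd
            rcases List.mem_cons.mp hd with h1 | h1
            · subst h1; exact ha
            · rw [hrunmem d h1, ha]),
          ih]
      simp [ha]
    · -- non-alphabetic run: counted, then flushed
      have ha' : PySem.Chars.isalpha c = false := by simpa using ha
      rw [hsplit, gmpLoopA_nonalpha_run _ _ (by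
            intro d hd
            rcases List.mem_cons.mp hd with h1 | h1
            · subst h1; exact ha'
            · rw [hrunmem d h1, ha']) 0]
      simp only [List.length_cons, Nat.zero_add]
      rw [gmpLoopA_flush _ _ (by omega) (by
            intro d hd
            have := hhead d hd
            rw [ha'] at this
            simpa using this),
          ih]
      simp [ha', gmpNonAlphaRe]

-- ===== VERDICT (by name: the statement is the Claim_ definition above) =====
theorem generate_match_pattern_spec : Claim_equal_generate_match_pattern := by
  intro s _
  unfold Spec_generate_match_pattern generate_match_pattern generate_match_pattern_alt
  rw [gmpLoopA_eq_gmpRuns]
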